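-- pv_equiv track=rewrite | github.com/belkhayaty/BigDataFrameworks-MapReduce | mapreduce.py | shufflefunction
-- ===== SOURCE A (Python) =====
-- def shufflefunction(wordspairlist):
--     coupleslist = [] # empty list that will contain every word without their multiplicity
--
--     for wordsperline in wordspairlist:                  # concatenate all the lists in the list
--         coupleslist = coupleslist + wordsperline        # to one long list
--
--     fullcoupleslist = [] # empty list that will contain every word with their multiplicity
--
--     for index in range(len(coupleslist)):               # going through the list adding couples
--         addcouple(fullcoupleslist, coupleslist[index])
--
--     return fullcoupleslist
--
-- def addcouple(finalcoupleslist, couple): # function that add a couple if it does'nt already exists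
--                                          # else it add an occurence in the list
--
--     for index in range(len(finalcoupleslist)):
--         couples = finalcoupleslist[index]
--         if couples[0] == couple[0]: # if already exists
--             finalcoupleslist[index] = (finalcoupleslist[index][0], finalcoupleslist[index][1] + [1])
--             return
--
--     #if it doesn't already exist add a new one
--     finalcoupleslist.append((couple[0], [1]))
--     return
-- ===== SOURCE B (Python) =====
-- def shufflefunction(wordspairlist):
--     # partition-by-first-key grouping: repeatedly take the first remaining key,
--     # count all its occurrences at once, and filter them out of the work list
--     keys = [couple[0] for line in wordspairlist for couple in line]
--     result = []
--     while keys: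
--         k = keys[0]
--         result.append((k, [1] * keys.count(k)))
--         keys = [x for x in keys if x != k]
--     return result
-- ===== Notes on version B (the rewrite author's own statement) =====
-- stated objective: alternative
-- what changed: replaces A's incremental accumulator (linear scan and update per element via addcouple) with a partition-refinement loop: flatten the keys once, then repeatedly take the first remaining key, count all its occurrences at once, and filter them out of the work list
import Mathlib
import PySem

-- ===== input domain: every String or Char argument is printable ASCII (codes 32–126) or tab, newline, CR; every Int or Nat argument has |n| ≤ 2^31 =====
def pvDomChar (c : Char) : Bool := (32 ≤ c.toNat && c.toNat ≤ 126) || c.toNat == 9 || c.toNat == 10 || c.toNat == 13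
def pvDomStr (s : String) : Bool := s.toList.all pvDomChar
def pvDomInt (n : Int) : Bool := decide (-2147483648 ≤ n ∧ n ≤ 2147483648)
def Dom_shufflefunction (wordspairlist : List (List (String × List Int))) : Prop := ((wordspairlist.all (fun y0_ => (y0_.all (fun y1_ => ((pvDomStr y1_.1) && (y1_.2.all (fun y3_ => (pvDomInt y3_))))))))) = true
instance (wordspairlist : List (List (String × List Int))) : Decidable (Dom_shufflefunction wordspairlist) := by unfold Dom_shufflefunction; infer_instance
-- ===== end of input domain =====

-- B replaces A's incremental accumulator (scan-and-update per element) by partition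
-- refinement: flatten the keys, then repeatedly take the first key, count all its
-- occurrences at once, and filter them out (objective: alternative). Return-value
-- equivalence only: A mutates its local accumulator, neither mutates the argument.

-- ===== PORT A =====
-- first-match scan of the accumulator: replace the matching pair's list with one more 1, else append
def addcouple : List (String × List Int) → (String × List Int) → List (String × List Int)
  | [], couple => [(couple.1, [1])]
  | (w, v) :: rest, couple =>
      if w == couple.1 then (w, v ++ [1]) :: rest
      else (w, v) :: addcouple rest couple

def shufflefunction (wordspairlist : List (List (String × List Int))) : List (String × List Int) :=
  let coupleslist := wordspairlist.foldl (fun acc wordsperline => acc ++ wordsperline) []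
  coupleslist.foldl addcouple []

-- ===== PORT B =====
-- the while loop of Source B: take the first remaining key, count its occurrences, filter them out
def groupKeys : List String → List (String × List Int)
  | [] => []
  | k :: rest =>
      (k, List.replicate ((k :: rest).count k) 1) :: groupKeys (rest.filter (fun x => x != k))
termination_by keys => keys.length
decreasing_by
  simpa using Nat.lt_succ_of_le (List.length_filter_le _ rest)

def shufflefunction_alt (wordspairlist : List (List (String × List Int))) : List (String × List Int) :=
  groupKeys (wordspairlist.flatMap (fun line => line.map (fun couple => couple.1)))

-- ===== PRECONDITION & SPEC =====
def Spec_shufflefunction (wordspairlist : List (List (String × List Int))) (out : List (String × List Int)) : Prop := out = shufflefunction_alt wordspairlist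
instance (wordspairlist : List (List (String × List Int))) (out : List (String × List Int)) : Decidable (Spec_shufflefunction wordspairlist out) := by unfold Spec_shufflefunction; infer_instance

-- ===== CLAIM (what is proved, stated in full; the proofs are below) =====
def Claim_equal_shufflefunction : Prop := ∀ (wordspairlist : List (List (String × List Int))), Dom_shufflefunction wordspairlist → Spec_shufflefunction wordspairlist (shufflefunction wordspairlist)

-- ===== LEMMAS AND PROOFS =====

-- proof-only model of A's accumulator: key together with its multiplicity
def bump : List (String × Nat) → String → List (String × Nat)
  | [], k => [(k, 1)]
  | (w, n) :: rest, k =>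
      if w == k then (w, n + 1) :: rest
      else (w, n) :: bump rest k

-- expansion of a count entry into A's concrete accumulator entry
def exp1 (p : String × Nat) : String × List Int := (p.1, List.replicate p.2 1)

theorem addcouple_map (m : List (String × Nat)) (c : String × List Int) :
    addcouple (m.map exp1) c = (bump m c.1).map exp1 := by
  induction m with
  | nil => rfl
  | cons p rest ih =>
      obtain ⟨w, n⟩ := p
      simp only [List.map_cons, exp1, addcouple, bump]
      by_cases h : w == c.1
      · simp [h, exp1, ← List.replicate_succ']
      · simp only [h]; simp [exp1, ih]

theorem foldl_addcouple_map (xs : List (String × List Int)) (m : List (String × Nat)) :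
    xs.foldl addcouple (m.map exp1) = (xs.foldl (fun m c => bump m c.1) m).map exp1 := by
  induction xs generalizing m with
  | nil => rfl
  | cons c rest ih => simp only [List.foldl_cons, addcouple_map, ih]

-- bump on a list of distinct keys containing k increments k's count
theorem bump_of_mem (l : List String) (g : String → Nat) (k : String)
    (hk : k ∈ l) (hnd : l.Nodup) :
    bump (l.map (fun j => (j, g j))) k = l.map (fun j => (j, if j = k then g j + 1 else g j)) := by
  induction l with
  | nil => cases hk
  | cons w rest ih =>
      simp only [List.map_cons, bump]
      rcases List.nodup_cons.mp hnd with ⟨hw, hrest⟩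
      by_cases h : w = k
      · subst h
        simp only [beq_self_eq_true, if_true]
        have : ∀ j ∈ rest, (fun j => (j, if j = w then g j + 1 else g j)) j = (fun j => (j, g j)) j := by
          intro j hj
          have : j ≠ w := fun e => hw (e ▸ hj)
          simp [this]
        simp [List.map_congr_left this]
      · have hk' : k ∈ rest := by
          cases hk with
          | head => exact absurd rfl h
          | tail _ h' => exact h'
        have hbeq : (w == k) = false := beq_false_of_ne h
        simp [hbeq, h, ih hk' hrest]

-- bump on a list with no entry keyed k appends (k, 1)
theorem bump_of_not_mem (m : List (String × Nat)) (k : String)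
    (h : ∀ p ∈ m, p.1 ≠ k) : bump m k = m ++ [(k, 1)] := by
  induction m with
  | nil => rfl
  | cons p rest ih =>
      obtain ⟨w, n⟩ := p
      have hw : w ≠ k := h (w, n) (by simp)
      simp [bump, beq_false_of_ne hw, ih (fun q hq => h q (by simp [hq]))]

theorem bump_counts (pre : List String) (k : String) :
    bump ((PySem.Set.ofList pre).map (fun j => (j, pre.count j))) k
      = (PySem.Set.ofList (pre ++ [k])).map (fun j => (j, (pre ++ [k]).count j)) := by
  rw [PySem.Set.ofList_append_singleton]
  by_cases hk : k ∈ pre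
  · have hk' : k ∈ PySem.Set.ofList pre := (PySem.Set.mem_ofList pre k).mpr hk
    rw [PySem.Set.add_of_mem hk']
    rw [bump_of_mem _ _ _ hk' (PySem.Set.nodup_ofList pre)]
    apply List.map_congr_left
    intro j _
    by_cases hj : j = k
    · subst hj; simp [List.count_append]
    · have hj2 : k ≠ j := fun e => hj e.symm
      simp [List.count_append, hj, hj2]
  · have hk' : k ∉ PySem.Set.ofList pre := fun h => hk ((PySem.Set.mem_ofList pre k).mp h)
    rw [PySem.Set.add_of_not_mem hk']
    rw [bump_of_not_mem]
    · simp only [List.map_append, List.map_cons, List.map_nil]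
      congr 1
      · apply List.map_congr_left
        intro j hj
        have hj' : j ≠ k := fun e => hk (e ▸ (PySem.Set.mem_ofList pre j).mp hj)
        have hj2 : k ≠ j := fun e => hj' e.symm
        simp [List.count_append, hj2]
      · simp [List.count_append, List.count_eq_zero_of_not_mem hk]
    · intro p hp
      rcases List.mem_map.mp hp with ⟨j, hj, rfl⟩
      exact fun e => hk (e ▸ (PySem.Set.mem_ofList pre j).mp hj)

theorem foldl_bump_counts (ks pre : List String) :
    ks.foldl bump ((PySem.Set.ofList pre).map (fun j => (j, pre.count j)))
      = (PySem.Set.ofList (pre ++ ks)).map (fun j => (j, (pre ++ ks).count j)) := by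
  induction ks generalizing pre with
  | nil => simp
  | cons k rest ih =>
      rw [List.foldl_cons, bump_counts, ih (pre ++ [k])]
      simp

-- B-side lemma 1: elements all ≠ k fold over (k :: s) as k :: (fold over s)
theorem foldl_add_cons (l : List String) (k : String) (s : List String)
    (h : ∀ x ∈ l, x ≠ k) :
    l.foldl PySem.Set.add (k :: s) = k :: l.foldl PySem.Set.add s := by
  induction l generalizing s with
  | nil => rfl
  | cons x rest ih =>
      have hx : x ≠ k := h x (by simp)
      have step : PySem.Set.add (k :: s) x = k :: PySem.Set.add s x := by
        simp [PySem.Set.add, PySem.Set.contains, hx]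
        split_ifs <;> simp
      simp only [List.foldl_cons, step]
      exact ih _ (fun y hy => h y (by simp [hy]))
-- B-side lemma 2: folding add over elements equal to k already present is absorbed
theorem foldl_add_filter (l : List String) (k : String) (s : List String)
    (hk : k ∈ s) :
    l.foldl PySem.Set.add s = (l.filter (fun x => x != k)).foldl PySem.Set.add s := by
  induction l generalizing s with
  | nil => rfl
  | cons x rest ih =>
      by_cases hx : x = k
      · subst hx
        have : PySem.Set.add s x = s := PySem.Set.add_of_mem hk
        simp [this, ih s hk]
      · have hmem : k ∈ PySem.Set.add s x := by
          simp [PySem.Set.add]; split_ifs <;> simp [hk]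
        simp [hx, ih _ hmem]

-- B-side lemma 3: first-occurrence dedup of k :: rest is k followed by dedup of rest without k
theorem ofList_cons_filter (k : String) (rest : List String) :
    PySem.Set.ofList (k :: rest)
      = k :: PySem.Set.ofList (rest.filter (fun x => x != k)) := by
  rw [PySem.Set.ofList_eq_foldl, PySem.Set.ofList_eq_foldl]
  show rest.foldl PySem.Set.add (PySem.Set.add [] k) = _
  have h1 : PySem.Set.add ([] : List String) k = [k] := rfl
  rw [h1, foldl_add_filter rest k [k] (by simp)]
  exact foldl_add_cons _ k [] (by intro x hx; simpa using (List.of_mem_filter hx))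

-- B's loop computes exactly (dedup keys) paired with replicated counts
theorem groupKeys_eq (keys : List String) :
    groupKeys keys
      = (PySem.Set.ofList keys).map (fun j => (j, List.replicate (keys.count j) 1)) := by
  induction hn : keys.length using Nat.strong_induction_on generalizing keys with
  | _ n ih =>
    match keys, hn with
    | [], _ => simp [groupKeys, PySem.Set.ofList_nil]
    | k :: rest, hn =>
      have hlt : (rest.filter (fun x => x != k)).length < n := by
        subst hn; simpa using Nat.lt_succ_of_le (List.length_filter_le _ rest)
      rw [groupKeys, ih _ hlt _ rfl, ofList_cons_filter]
      simp only [List.map_cons, List.cons.injEq, true_and]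
      apply List.map_congr_left
      intro j hj
      have hj1 : j ∈ rest.filter (fun x => x != k) :=
        (PySem.Set.mem_ofList _ j).mp hj
      have hjk : j ≠ k := by simpa using (List.of_mem_filter hj1)
      have hc : (rest.filter (fun x => x != k)).count j = rest.count j :=
        List.count_filter (by simpa using hjk)
      simp [hc, Ne.symm hjk]

-- ===== VERDICT (by name: the statement is the Claim_ definition above) =====
theorem shufflefunction_spec : Claim_equal_shufflefunction := by
  intro wps _
  show _ = _
  simp only [shufflefunction, shufflefunction_alt]
  rw [PySem.List.foldl_append_eq_flatten, List.nil_append]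
  have hkeys : wps.flatMap (fun line => line.map (fun couple => couple.1))
      = wps.flatten.map (fun c => c.1) := by
    simp [List.flatMap_def, List.map_flatten]
  have hA : wps.flatten.foldl addcouple ([] : List (String × List Int))
      = ((PySem.Set.ofList (wps.flatten.map (·.1))).map
          (fun j => (j, (wps.flatten.map (·.1)).count j))).map exp1 := by
    have h0 : ([] : List (String × List Int)) = (([] : List (String × Nat)).map exp1) := rfl
    rw [h0, foldl_addcouple_map]
    have hm : wps.flatten.foldl (fun m c => bump m c.1) ([] : List (String × Nat))
        = (wps.flatten.map (·.1)).foldl bump [] := List.foldl_map.symm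
    have h := foldl_bump_counts (wps.flatten.map (·.1)) []
    simp only [PySem.Set.ofList_nil, List.map_nil, List.nil_append] at h
    rw [hm, h]
  rw [hA, hkeys, groupKeys_eq]
  simp [exp1, Function.comp]
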